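-- pv_equiv track=rewrite | github.com/ultras8/pythonLab | lastWordPosition.py | lastWordPosition
-- ===== SOURCE A (Python) =====
-- def lastWordPosition(word):
--     wordAns = ""
--     for i in range (len(word)):
--         temp = word[i]
--         if(word.count(temp) > 1):
--             tempword = word[i]
--             max = 0
--             for x in range (len(word)):
--                 if tempword == word[x]:
--                     max = x
--             wordAns += str(max+1)
--         else:
--             wordAns += str(i+1)
--     return wordAns
-- ===== SOURCE B (Python) =====
-- def lastWordPosition(word):
--     last = {}
--     for i, c in enumerate(word):
--         last[c] = i + 1
--     return ''.join(str(last[c]) for c in word)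
-- ===== Notes on version B (the rewrite author's own statement) =====
-- stated objective: faster
-- what changed: Replaced the per-character substring count and inner last-occurrence scan with a single pass building a last-occurrence dict (the duplicated/unique branch collapses: the answer is always last-occurrence index + 1), then one output pass.
import Mathlib
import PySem

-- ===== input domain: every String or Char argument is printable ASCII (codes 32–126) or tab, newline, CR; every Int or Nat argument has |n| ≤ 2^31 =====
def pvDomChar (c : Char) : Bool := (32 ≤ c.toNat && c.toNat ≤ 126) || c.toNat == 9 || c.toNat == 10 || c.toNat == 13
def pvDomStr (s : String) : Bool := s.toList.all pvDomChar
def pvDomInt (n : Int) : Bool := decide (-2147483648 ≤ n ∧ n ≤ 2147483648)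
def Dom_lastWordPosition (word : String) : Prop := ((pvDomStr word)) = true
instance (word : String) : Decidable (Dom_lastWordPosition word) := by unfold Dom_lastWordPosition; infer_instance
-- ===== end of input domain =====

-- B replaces A's per-character substring count and inner last-occurrence scan (O(n^2)) with one
-- pass building a last-occurrence dict, then one output pass (objective: faster).

-- ===== PORT A =====
-- word[i] with i taken from range(len(word)) is always in range: pyGetD is exact here.
-- temp = word[i] is a 1-character string; 'tempword == word[x]' is exactly Char equality, and
-- word.count(temp) is PySem.Chars.count of the singleton substring [temp] (exact).
def lastWordPosition (word : String) : String :=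
  let cs := word.toList
  let n : Int := (cs.length : Int)
  String.ofList <|
    (PySem.List.pyRange 0 n 1).foldl (fun wordAns i =>
      let temp := PySem.List.pyGetD cs i ' '
      if PySem.Chars.count cs [temp] > 1 then
        let mx := (PySem.List.pyRange 0 n 1).foldl
          (fun mx x => if temp = PySem.List.pyGetD cs x ' ' then x else mx) 0
        wordAns ++ PySem.Int.toChars (mx + 1)
      else
        wordAns ++ PySem.Int.toChars (i + 1)) []

-- ===== PORT B =====
-- last[c] in the final pass never raises (every c of word is a key of last); getD's default 0 is
-- unreachable, so it is exact.
def lastWordPosition_alt (word : String) : String :=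
  let cs := word.toList
  let last := (PySem.List.enumerate cs).foldl
      (fun d p => d.insert p.2 (p.1 + 1)) (PySem.Dict.empty : PySem.Dict Char Int)
  String.ofList (PySem.Chars.join [] (cs.map (fun c => PySem.Int.toChars (last.getD c 0))))

-- ===== PRECONDITION & SPEC =====
def Spec_lastWordPosition (word : String) (out : String) : Prop := out = lastWordPosition_alt word
instance (word : String) (out : String) : Decidable (Spec_lastWordPosition word out) := by unfold Spec_lastWordPosition; infer_instance

-- ===== CLAIM (what is proved, stated in full; the proofs are below) =====
def Claim_equal_lastWordPosition : Prop := ∀ (word : String), Dom_lastWordPosition word → Spec_lastWordPosition word (lastWordPosition word)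

-- ===== LEMMAS AND PROOFS =====

-- index of the LAST occurrence of c in cs, if any
def lastIdx? (cs : List Char) (c : Char) : Option Nat :=
  match cs with
  | [] => none
  | x :: xs =>
    match lastIdx? xs c with
    | some j => some (j + 1)
    | none => if x = c then some 0 else none

theorem lastIdx?_eq_none_iff (cs : List Char) (c : Char) : lastIdx? cs c = none ↔ c ∉ cs := by
  induction cs with
  | nil => simp [lastIdx?]
  | cons x xs ih =>
    simp only [lastIdx?, List.mem_cons]
    cases h : lastIdx? xs c with
    | some j => simp [h] at ih ⊢; tauto
    | none =>
      simp [h] at ih ⊢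
      exact ⟨fun hn => ⟨fun e => hn e.symm, ih⟩, fun hp e => hp.1 e.symm⟩

theorem lastIdx?_append_singleton (ys : List Char) (y c : Char) :
    lastIdx? (ys ++ [y]) c = if y = c then some ys.length else lastIdx? ys c := by
  induction ys with
  | nil => simp [lastIdx?]
  | cons x xs ih =>
    simp only [List.cons_append, lastIdx?, ih]
    split_ifs with hy <;> cases h : lastIdx? xs c <;> simp [List.length_cons]

-- word.count(temp) for a 1-character temp is the character count
theorem count_go_singleton (c : Char) (l : List Char) (fuel acc : ℕ) (h : l.length ≤ fuel) :
    PySem.Chars.count.go [c] fuel l acc = acc + l.count c := by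
  induction l generalizing fuel acc with
  | nil => cases fuel <;> simp [PySem.Chars.count.go]
  | cons x xs ih =>
    cases fuel with
    | zero => simp at h
    | succ f =>
      simp only [PySem.Chars.count.go, List.isPrefixOf]
      by_cases hx : x = c
      · simp [hx, ih f _ (by simpa using h)]; ring
      · simp [Ne.symm hx, hx, ih f _ (by simpa using h)]

theorem count_singleton (cs : List Char) (c : Char) :
    PySem.Chars.count cs [c] = cs.count c := by
  simp [PySem.Chars.count, count_go_singleton c cs cs.length 0 le_rfl]

theorem join_nil_flatten (parts : List (List Char)) :
    PySem.Chars.join [] parts = parts.flatten := by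
  show ([] : List Char).intercalate parts = parts.flatten
  induction parts with
  | nil => simp [List.intercalate]
  | cons p ps ih =>
    cases ps with
    | nil => simp [List.intercalate]
    | cons q qs =>
      simp only [List.intercalate, List.intersperse] at *
      simp_all [List.flatten]

-- A's inner scan computes the last occurrence index
theorem innerFold_eq (cs : List Char) (c : Char) (acc : Int) :
    (PySem.List.pyRange 0 (cs.length : Int) 1).foldl
        (fun m x => if c = PySem.List.pyGetD cs x ' ' then x else m) acc =
      (match lastIdx? cs c with | some j => (j : Int) | none => acc) := by
  induction cs using List.reverseRecOn with
  | nil => simp [lastIdx?]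
  | append_singleton ys y ih =>
    have hlen : ((ys ++ [y]).length : Int) = (ys.length : Int) + 1 := by
      simp
    rw [hlen, PySem.List.pyRange_one_succ_right (by positivity), List.foldl_append]
    have hcongr : (PySem.List.pyRange 0 (ys.length : Int) 1).foldl
        (fun m x => if c = PySem.List.pyGetD (ys ++ [y]) x ' ' then x else m) acc =
        (PySem.List.pyRange 0 (ys.length : Int) 1).foldl
        (fun m x => if c = PySem.List.pyGetD ys x ' ' then x else m) acc := by
      apply PySem.List.foldl_congr_mem
      intro m x hx
      rw [PySem.List.mem_pyRange_one] at hx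
      rw [PySem.List.pyGetD_eq_getElem _ _ hx.1 (by simp; omega),
          PySem.List.pyGetD_eq_getElem _ _ hx.1 (by exact_mod_cast hx.2),
          List.getElem_append_left (by omega)]
    rw [hcongr, ih, lastIdx?_append_singleton]
    simp only [List.foldl_cons, List.foldl_nil]
    rw [PySem.List.pyGetD_eq_getElem _ _ (by positivity) (by simp)]
    have hgete : (ys ++ [y])[((ys.length : Int)).toNat] = y := by
      simp
    rw [hgete]
    by_cases hy : y = c
    · simp [hy]
    · simp [hy, show ¬ c = y from fun h => hy h.symm]

-- B's dict holds last-occurrence index + 1 (shifted by the enumeration start)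
theorem dictFold_getD (cs : List Char) (s : Int) (d : PySem.Dict Char Int) (c : Char) :
    ((PySem.List.enumerate cs s).foldl (fun d p => d.insert p.2 (p.1 + 1)) d).getD c 0 =
      (match lastIdx? cs c with | some j => s + j + 1 | none => d.getD c 0) := by
  induction cs generalizing s d with
  | nil => simp [PySem.List.enumerate, lastIdx?]
  | cons x xs ih =>
    rw [PySem.List.enumerate_cons]
    simp only [List.foldl_cons, lastIdx?]
    rw [ih]
    cases h : lastIdx? xs c with
    | some j =>
      show s + 1 + (j : Int) + 1 = s + ((j + 1 : Nat) : Int) + 1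
      push_cast
      ring
    | none =>
      show (d.insert x (s + 1)).getD c 0 =
        (match (if x = c then some 0 else none : Option Nat) with
          | some j => s + (j : Int) + 1
          | none => d.getD c 0)
      rw [PySem.Dict.getD_insert]
      split_ifs with h1 h2 h3
      · show (s + 1 : Int) = s + ((0 : Nat) : Int) + 1
        push_cast
        ring
      · exact absurd h1.symm h2
      · exact absurd h3.symm h1
      · rfl

-- if c occurs exactly once, its position is its last occurrence
theorem lastIdx?_of_count_one (cs : List Char) (c : Char) (i : Nat)
    (hc : cs.count c = 1) (hi : cs[i]? = some c) : lastIdx? cs c = some i := by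
  induction cs generalizing i with
  | nil => simp at hi
  | cons x xs ih =>
    cases i with
    | zero =>
      simp at hi
      subst hi
      have hx0 : xs.count x = 0 := by simp at hc; omega
      have : lastIdx? xs x = none := by
        rw [lastIdx?_eq_none_iff]
        exact (List.count_eq_zero.mp hx0)
      simp [lastIdx?, this]
    | succ k =>
      simp at hi
      have hmem : c ∈ xs := List.mem_of_getElem? hi
      have hxc : ¬ x = c := by
        intro hx
        subst hx
        have := List.count_pos_iff.mpr hmem
        simp at hc
        omega
      have hcount : xs.count c = 1 := by simp [hxc] at hc ⊢; omega
      simp [lastIdx?, ih k hcount hi]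

-- ===== VERDICT (by name: the statement is the Claim_ definition above) =====
theorem lastWordPosition_spec : Claim_equal_lastWordPosition := by
  intro word _
  simp only [Spec_lastWordPosition, lastWordPosition, lastWordPosition_alt]
  set cs := word.toList with hcs
  rw [join_nil_flatten]
  congr 1
  -- turn A's outer loop into a flatMap over the range
  rw [PySem.List.foldl_congr_mem _ _
      (fun (acc : List Char) (i : Int) =>
        acc ++ (if PySem.Chars.count cs [PySem.List.pyGetD cs i ' '] > 1 then
          PySem.Int.toChars ((PySem.List.pyRange 0 (cs.length : Int) 1).foldl
            (fun mx x => if PySem.List.pyGetD cs i ' ' = PySem.List.pyGetD cs x ' ' then x else mx) 0 + 1)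
        else PySem.Int.toChars (i + 1))) []
      (by
        intro acc i _
        by_cases h : PySem.Chars.count cs [PySem.List.pyGetD cs i ' '] > 1 <;> simp [h]),
    PySem.List.foldl_append_eq_flatMap, List.nil_append, List.flatMap_def]
  congr 1
  -- element-wise equality of the two maps
  apply List.ext_getElem (by simp [PySem.List.length_pyRange_one])
  intro k hk hk'
  simp only [List.length_map, PySem.List.length_pyRange_one, Int.sub_zero, Int.toNat_natCast] at hk
  simp only [List.getElem_map]
  rw [PySem.List.getElem_pyRange_one]
  have hget : PySem.List.pyGetD cs (0 + (k : Int)) ' ' = cs[k] := by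
    rw [PySem.List.pyGetD_eq_getElem _ _ (by positivity) (by simp; exact_mod_cast hk)]
    simp
  rw [hget]
  obtain ⟨j, hj⟩ : ∃ j, lastIdx? cs cs[k] = some j := by
    cases h : lastIdx? cs cs[k] with
    | none =>
      exact absurd ((lastIdx?_eq_none_iff _ _).mp h) (by simp [List.getElem_mem])
    | some j => exact ⟨j, rfl⟩
  rw [dictFold_getD, hj]
  simp only []
  by_cases hdup : PySem.Chars.count cs [cs[k]] > 1
  · rw [if_pos hdup, innerFold_eq, hj]
    congr 1
    ring
  · rw [if_neg hdup]
    rw [count_singleton] at hdup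
    have h1 : cs.count cs[k] = 1 := by
      have := List.count_pos_iff.mpr (List.getElem_mem hk)
      omega
    have heq := lastIdx?_of_count_one cs cs[k] k h1 (by simp [hk])
    rw [hj] at heq
    injection heq with hjk
    subst hjk
    rfl
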